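-- pv_equiv track=rewrite | github.com/rinai1122/songsmith-mcp | songsmith_mcp/lyrics/syllabify.py | _vowel_groups
-- ===== SOURCE A (Python) =====
-- _VOWELS = set("aeiouy")
--
-- _HIATUS_PAIRS = frozenset({
--     "ia", "ie", "io", "iu",
--     "eo",
--     "ua", "ue", "ui", "uo",
-- })
--
-- def _vowel_groups(word: str) -> list[tuple[int, int]]:
--     """Return [(start, end)] of vowel runs in ``word``, split at hiatus
--     boundaries so e.g. ``neon`` -> [(1,2), (2,3)] (two syllables), not
--     ``[(1,3)]`` (one)."""
--     w = word.lower()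
--     groups: list[tuple[int, int]] = []
--     i = 0
--     while i < len(w):
--         if w[i] in _VOWELS:
--             # 'u' following 'q' is part of the /kw/ digraph, not a vowel
--             # nucleus — 'quiet' is qui-et (2), not qu-i-et (3).
--             if w[i] == "u" and i > 0 and w[i - 1] == "q":
--                 i += 1
--                 continue
--             j = i
--             while j < len(w) and w[j] in _VOWELS:
--                 j += 1
--             # Split this vowel run at hiatus pair boundaries.
--             run_start = i
--             k = i
--             while k < j - 1:
--                 pair = w[k] + w[k + 1]
--                 if pair in _HIATUS_PAIRS:
--                     groups.append((run_start, k + 1))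
--                     run_start = k + 1
--                 k += 1
--             groups.append((run_start, j))
--             i = j
--         else:
--             i += 1
--     # Silent terminal 'e' after a consonant (e.g. "lone", "fire") doesn't
--     # form its own syllable. 'le' endings ("apple", "little") do.
--     if (
--         groups
--         and groups[-1] == (len(w) - 1, len(w))
--         and w[-1] == "e"
--         and len(w) >= 2
--         and w[-2] not in _VOWELS
--         and w[-2] != "l"
--     ):
--         groups.pop()
--     return groups
-- ===== SOURCE B (Python) =====
-- _VOWELS = set("aeiouy")
--
-- _HIATUS_PAIRS = frozenset({
--     "ia", "ie", "io", "iu",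
--     "eo",
--     "ua", "ue", "ui", "uo",
-- })
--
-- def _vowel_groups(word: str) -> list[tuple[int, int]]:
--     """Classify each position once: a position is a nucleus iff it is a vowel
--     that is not the 'u' of a 'qu' digraph; group starts/ends are read off the
--     nucleus/hiatus predicates with two comprehensions and zipped together."""
--     w = word.lower()
--     n = len(w)
--
--     def nuc(i: int) -> bool:
--         return 0 <= i < n and w[i] in _VOWELS and not (
--             w[i] == "u" and i > 0 and w[i - 1] == "q"
--         )
--
--     starts = [i for i in range(n)
--               if nuc(i) and (not nuc(i - 1) or w[i - 1] + w[i] in _HIATUS_PAIRS)]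
--     ends = [i + 1 for i in range(n)
--             if nuc(i) and (not nuc(i + 1) or w[i] + w[i + 1] in _HIATUS_PAIRS)]
--     groups = list(zip(starts, ends))
--     if (
--         groups
--         and groups[-1] == (n - 1, n)
--         and w[-1] == "e"
--         and n >= 2
--         and w[-2] not in _VOWELS
--         and w[-2] != "l"
--     ):
--         groups.pop()
--     return groups
-- ===== Notes on version B (the rewrite author's own statement) =====
-- stated objective: alternative
-- what changed: A's nested while-loops with mutable run/split state are replaced by a stateless position classification: a nucleus/hiatus predicate per index, two range comprehensions collecting group starts and group ends, zipped into the group list (same silent-'e' trim).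
import Mathlib
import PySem

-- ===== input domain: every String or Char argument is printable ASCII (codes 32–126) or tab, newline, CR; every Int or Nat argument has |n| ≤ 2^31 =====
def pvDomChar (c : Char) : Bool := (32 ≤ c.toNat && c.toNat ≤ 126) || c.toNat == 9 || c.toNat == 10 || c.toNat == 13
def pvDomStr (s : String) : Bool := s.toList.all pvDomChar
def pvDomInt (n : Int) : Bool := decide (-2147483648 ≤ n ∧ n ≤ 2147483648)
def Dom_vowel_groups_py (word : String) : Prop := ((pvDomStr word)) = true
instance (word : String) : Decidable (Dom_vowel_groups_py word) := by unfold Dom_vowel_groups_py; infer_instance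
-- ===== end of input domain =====

-- B replaces A's nested while-loops by a single position classification: two range filters
-- (group starts / group ends) zipped together; objective: alternative decomposition, no speed claim.

-- shared module constants _VOWELS and _HIATUS_PAIRS
def pvIsV (c : Char) : Bool :=
  c = 'a' || c = 'e' || c = 'i' || c = 'o' || c = 'u' || c = 'y'

def pvHiat (a b : Char) : Bool :=
  (a = 'i' && (b = 'a' || b = 'e' || b = 'o' || b = 'u')) ||
  (a = 'e' && b = 'o') ||
  (a = 'u' && (b = 'a' || b = 'e' || b = 'i' || b = 'o'))

-- guarded indexing w[i] (every use in both ports is in range, so the default is never taken)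
def pvAt (w : List Char) (i : Nat) : Char := w.getD i ' '

-- ===== PORT A =====
-- inner `while j < len(w) and w[j] in _VOWELS: j += 1`
def pvFindJ (w : List Char) (j : Nat) : Nat :=
  if h : j < w.length ∧ pvIsV (pvAt w j) = true then pvFindJ w (j + 1) else j
termination_by w.length - j
decreasing_by omega

-- termination helper for the outer loop: the run-scan strictly advances
theorem pvFindJ_ge (w : List Char) (j : Nat) : j ≤ pvFindJ w j := by
  rw [pvFindJ]
  split
  next h => exact Nat.le_of_succ_le (pvFindJ_ge w (j + 1))
  next => exact Nat.le_refl j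
termination_by w.length - j
decreasing_by omega

theorem pvFindJ_gt (w : List Char) (i : Nat) (h1 : i < w.length)
    (h2 : pvIsV (pvAt w i) = true) : i < pvFindJ w i := by
  rw [pvFindJ]
  split
  next => exact Nat.lt_of_lt_of_le (Nat.lt_succ_self i) (pvFindJ_ge w (i + 1))
  next h => exact absurd ⟨h1, h2⟩ h

-- `while k < j - 1: …` — splits the current run at hiatus boundaries; returns (groups, run_start)
def pvSplitK (w : List Char) (j rs k : Nat) (groups : List (Int × Int)) :
    List (Int × Int) × Nat :=
  if k < j - 1 then
    if pvHiat (pvAt w k) (pvAt w (k + 1)) then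
      pvSplitK w j (k + 1) (k + 1) (groups ++ [((rs : Int), ((k + 1 : Nat) : Int))])
    else
      pvSplitK w j rs (k + 1) groups
  else (groups, rs)
termination_by j - 1 - k

-- outer `while i < len(w)` loop
def pvLoopA (w : List Char) (i : Nat) (groups : List (Int × Int)) : List (Int × Int) :=
  if h : i < w.length then
    if hv : pvIsV (pvAt w i) = true then
      if pvAt w i = 'u' ∧ 0 < i ∧ pvAt w (i - 1) = 'q' then
        pvLoopA w (i + 1) groups
      else
        let j := pvFindJ w i
        let p := pvSplitK w j i i groups
        pvLoopA w j (p.1 ++ [((p.2 : Int), (j : Int))])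
    else pvLoopA w (i + 1) groups
  else groups
termination_by w.length - i
decreasing_by
  · omega
  · have := pvFindJ_gt w i h hv; omega
  · omega

-- indexing: every w[..] in A is guarded in range by the loop conditions, so getD is exact
def vowel_groups_py (word : String) : List (Int × Int) :=
  let w := (PySem.Str.lower word).toList
  let groups := pvLoopA w 0 []
  if groups ≠ [] ∧ groups.getLast? = some ((w.length : Int) - 1, (w.length : Int)) ∧
      pvAt w (w.length - 1) = 'e' ∧ 2 ≤ w.length ∧
      pvIsV (pvAt w (w.length - 2)) = false ∧ pvAt w (w.length - 2) ≠ 'l'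
  then groups.dropLast else groups

-- ===== PORT B =====
-- `nuc(i)`: position i (a Python int, possibly -1 or n) is a vowel nucleus
def pvNuc (w : List Char) (i : Int) : Bool :=
  decide (0 ≤ i) && decide (i < (w.length : Int)) && pvIsV (pvAt w i.toNat) &&
  !(decide (pvAt w i.toNat = 'u') && decide (0 < i) &&
    decide (pvAt w ((i - 1).toNat) = 'q'))

def vowel_groups_py_alt (word : String) : List (Int × Int) :=
  let w := (PySem.Str.lower word).toList
  let n := w.length
  let starts := ((List.range n).filter (fun i =>
      pvNuc w ((i : Nat) : Int) &&
        (!pvNuc w (((i : Nat) : Int) - 1) || pvHiat (pvAt w (i - 1)) (pvAt w i)))).map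
      (fun (i : Nat) => (i : Int))
  let ends := ((List.range n).filter (fun i =>
      pvNuc w ((i : Nat) : Int) &&
        (!pvNuc w (((i : Nat) : Int) + 1) || pvHiat (pvAt w i) (pvAt w (i + 1))))).map
      (fun (i : Nat) => ((i + 1 : Nat) : Int))
  let groups := starts.zip ends
  if groups ≠ [] ∧ groups.getLast? = some ((n : Int) - 1, (n : Int)) ∧
      pvAt w (n - 1) = 'e' ∧ 2 ≤ n ∧
      pvIsV (pvAt w (n - 2)) = false ∧ pvAt w (n - 2) ≠ 'l'
  then groups.dropLast else groups

-- ===== PRECONDITION & SPEC =====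
def Spec_vowel_groups_py (word : String) (out : List (Int × Int)) : Prop := out = vowel_groups_py_alt word
instance (word : String) (out : List (Int × Int)) : Decidable (Spec_vowel_groups_py word out) := by unfold Spec_vowel_groups_py; infer_instance

-- ===== CLAIM (what is proved, stated in full; the proofs are below) =====
def Claim_equal_vowel_groups_py : Prop := ∀ (word : String), Dom_vowel_groups_py word → Spec_vowel_groups_py word (vowel_groups_py word)

-- ===== LEMMAS AND PROOFS =====

-- ---- proof-side vocabulary ----
def pvCC (p : Nat × Nat) : Int × Int := ((p.1 : Int), (p.2 : Int))

-- B's two filter predicates, named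
def pvStartF (w : List Char) (i : Nat) : Bool :=
  pvNuc w ((i : Nat) : Int) &&
    (!pvNuc w (((i : Nat) : Int) - 1) || pvHiat (pvAt w (i - 1)) (pvAt w i))

def pvEndF (w : List Char) (i : Nat) : Bool :=
  pvNuc w ((i : Nat) : Int) &&
    (!pvNuc w (((i : Nat) : Int) + 1) || pvHiat (pvAt w i) (pvAt w (i + 1)))

-- hiatus cut points strictly inside the run [k, j)
def pvCuts (w : List Char) (k j : Nat) : List Nat :=
  ((List.range' k (j - 1 - k)).filter
    (fun m => pvHiat (pvAt w m) (pvAt w (m + 1)))).map (· + 1)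

-- consecutive pairs along x :: L
def pvChain (x : Nat) (L : List Nat) : List (Int × Int) := ((x :: L).zip L).map pvCC

-- B's pre-trim group list, restricted to positions ≥ i
def pvSE (w : List Char) (i : Nat) : List (Int × Int) :=
  (((List.range' i (w.length - i)).filter (pvStartF w)).zip
    (((List.range' i (w.length - i)).filter (pvEndF w)).map (· + 1))).map pvCC

-- ---- pvNuc on concrete index shapes ----
theorem pvNuc_of_neg (w : List Char) (i : Int) (h : i < 0) : pvNuc w i = false := by
  simp [pvNuc]; omega

theorem pvNuc_oob (w : List Char) (i : Int) (h : (w.length : Int) ≤ i) : pvNuc w i = false := by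
  simp [pvNuc]; omega

theorem pvNuc_natCast (w : List Char) (k : Nat) :
    pvNuc w ((k : Nat) : Int) =
      (decide (k < w.length) && pvIsV (pvAt w k) &&
        !(decide (pvAt w k = 'u') && decide (0 < k) && decide (pvAt w (k - 1) = 'q'))) := by
  have h1 : (((k : Nat) : Int) - 1).toNat = k - 1 := by omega
  simp only [pvNuc, Int.toNat_natCast, h1, Nat.cast_lt, Int.natCast_pos,
    Nat.cast_nonneg, decide_true, Bool.true_and]
  rfl

theorem pvNuc_cast_sub_one (w : List Char) (k : Nat) (hk : 0 < k) :
    pvNuc w (((k : Nat) : Int) - 1) = pvNuc w (((k - 1 : Nat) : Int)) := by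
  congr 1
  omega

theorem pvNuc_cast_add_one (w : List Char) (k : Nat) :
    pvNuc w (((k : Nat) : Int) + 1) = pvNuc w (((k + 1 : Nat) : Int)) := by
  have h : ((k : Nat) : Int) + 1 = ((k + 1 : Nat) : Int) := by omega
  rw [h]

theorem pvIsV_ne_q (c : Char) (h : pvIsV c = true) : c ≠ 'q' := fun hq => by
  subst hq
  exact absurd h (by decide)

-- ---- run facts about pvFindJ ----
theorem pvFindJ_le (w : List Char) (j : Nat) (h : j ≤ w.length) : pvFindJ w j ≤ w.length := by
  rw [pvFindJ]
  split
  next hc => exact pvFindJ_le w (j + 1) hc.1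
  next => exact h
termination_by w.length - j
decreasing_by omega

theorem pvFindJ_isV (w : List Char) (i k : Nat) (h1 : i ≤ k) (h2 : k < pvFindJ w i) :
    pvIsV (pvAt w k) = true := by
  rw [pvFindJ] at h2
  split at h2
  next hc =>
    rcases Nat.eq_or_lt_of_le h1 with rfl | h
    · exact hc.2
    · exact pvFindJ_isV w (i + 1) k h h2
  next => omega
termination_by w.length - i
decreasing_by omega

theorem pvFindJ_stop (w : List Char) (i : Nat) (h : pvFindJ w i < w.length) :
    pvIsV (pvAt w (pvFindJ w i)) = false := by
  by_cases hc : i < w.length ∧ pvIsV (pvAt w i) = true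
  · rw [pvFindJ, dif_pos hc] at h ⊢
    exact pvFindJ_stop w (i + 1) h
  · rw [pvFindJ, dif_neg hc] at h ⊢
    cases hisV : pvIsV (pvAt w i) with
    | false => rfl
    | true => exact absurd ⟨h, hisV⟩ hc
termination_by w.length - i
decreasing_by omega

-- ---- pvSplitK produces the chain of cut points ----
theorem pvChain_cons (x a : Nat) (L : List Nat) :
    pvChain x (a :: L) = pvCC (x, a) :: pvChain a L := rfl

theorem pvSplitK_eq (w : List Char) (j k rs : Nat) (groups : List (Int × Int)) :
    pvSplitK w j rs k groups =
      (groups ++ pvChain rs (pvCuts w k j), (pvCuts w k j).getLastD rs) := by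
  rw [pvSplitK]
  by_cases hk : k < j - 1
  · rw [if_pos hk]
    have hr : List.range' k (j - 1 - k) = k :: List.range' (k + 1) (j - 1 - (k + 1)) := by
      have h : j - 1 - k = (j - 1 - (k + 1)) + 1 := by omega
      rw [h, List.range'_succ]
    by_cases hh : pvHiat (pvAt w k) (pvAt w (k + 1)) = true
    · rw [if_pos hh]
      have hc : pvCuts w k j = (k + 1) :: pvCuts w (k + 1) j := by
        unfold pvCuts
        rw [hr, List.filter_cons_of_pos
          (p := fun m => pvHiat (pvAt w m) (pvAt w (m + 1))) hh, List.map_cons]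
      rw [pvSplitK_eq w j (k + 1) (k + 1), hc, pvChain_cons, List.getLastD_cons]
      simp [pvCC]
    · rw [if_neg hh]
      have hc : pvCuts w k j = pvCuts w (k + 1) j := by
        unfold pvCuts
        rw [hr, List.filter_cons_of_neg
          (p := fun m => pvHiat (pvAt w m) (pvAt w (m + 1))) (by simpa using hh)]
      rw [pvSplitK_eq w j (k + 1) rs, hc]
  · rw [if_neg hk]
    have hc : pvCuts w k j = [] := by
      have h : j - 1 - k = 0 := by omega
      simp [pvCuts, h]
    simp [hc, pvChain]
termination_by j - 1 - k
decreasing_by all_goals omega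

theorem pvChain_snoc (j : Nat) (L : List Nat) (x : Nat) :
    pvChain x L ++ [((L.getLastD x : Int), (j : Int))] = ((x :: L).zip (L ++ [j])).map pvCC := by
  induction L generalizing x with
  | nil => simp [pvChain, pvCC]
  | cons a L ih =>
    rw [pvChain_cons, List.getLastD_cons]
    have h : ((x :: a :: L).zip ((a :: L) ++ [j])).map pvCC
        = pvCC (x, a) :: ((a :: L).zip (L ++ [j])).map pvCC := rfl
    rw [h, ← ih a]
    simp

-- ---- pvSE step lemmas ----
theorem pvSE_oob (w : List Char) (i : Nat) (h : w.length ≤ i) : pvSE w i = [] := by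
  have h0 : w.length - i = 0 := by omega
  simp [pvSE, h0]

theorem pvSE_skip (w : List Char) (i : Nat) (h : i < w.length)
    (hn : pvNuc w ((i : Nat) : Int) = false) : pvSE w i = pvSE w (i + 1) := by
  have hr : List.range' i (w.length - i) = i :: List.range' (i + 1) (w.length - (i + 1)) := by
    have h' : w.length - i = (w.length - (i + 1)) + 1 := by omega
    rw [h', List.range'_succ]
  have hs : pvStartF w i = false := by simp [pvStartF, hn]
  have he : pvEndF w i = false := by simp [pvEndF, hn]
  unfold pvSE
  rw [hr, List.filter_cons_of_neg (p := pvStartF w) (by simpa using hs),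
    List.filter_cons_of_neg (p := pvEndF w) (by simpa using he)]

-- ---- how B's zip decomposes across one vowel run [i, j) ----
theorem pvSE_run (w : List Char) (i j : Nat) (hi : i < w.length) (hij : i < j)
    (hjl : j ≤ w.length)
    (hstart_i : pvStartF w i = true)
    (hstart_mid : ∀ k, i < k → k < j → pvStartF w k = pvHiat (pvAt w (k - 1)) (pvAt w k))
    (hend_mid : ∀ k, i ≤ k → k < j - 1 → pvEndF w k = pvHiat (pvAt w k) (pvAt w (k + 1)))
    (hend_last : pvEndF w (j - 1) = true) :
    pvSE w i =
      (pvChain i (pvCuts w i j) ++ [(((pvCuts w i j).getLastD i : Int), (j : Int))]) ++ pvSE w j := by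
  have hsplit : List.range' i (w.length - i) =
      List.range' i (j - i) ++ List.range' j (w.length - j) := by
    have h := List.range'_append_1 (s := i) (m := j - i) (n := w.length - j)
    rw [show i + (j - i) = j from by omega,
      show j - i + (w.length - j) = w.length - i from by omega] at h
    exact h.symm
  have hS : (List.range' i (w.length - i)).filter (pvStartF w) =
      (i :: pvCuts w i j) ++ (List.range' j (w.length - j)).filter (pvStartF w) := by
    rw [hsplit, List.filter_append]
    congr 1
    rw [show j - i = (j - 1 - i) + 1 from by omega, List.range'_succ,
      List.filter_cons_of_pos (p := pvStartF w) hstart_i]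
    congr 1
    rw [List.range'_succ_left, List.filter_map]
    unfold pvCuts
    congr 1
    apply List.filter_congr
    intro m hm
    rw [List.mem_range'_1] at hm
    have h1 := hstart_mid (m + 1) (by omega) (by omega)
    simpa using h1
  have hE : ((List.range' i (w.length - i)).filter (pvEndF w)).map (· + 1) =
      (pvCuts w i j ++ [j]) ++ ((List.range' j (w.length - j)).filter (pvEndF w)).map (· + 1) := by
    rw [hsplit, List.filter_append, List.map_append]
    congr 1
    have hsplit2 : List.range' i (j - i) = List.range' i (j - 1 - i) ++ [j - 1] := by
      have h := List.range'_append_1 (s := i) (m := j - 1 - i) (n := 1)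
      rw [show i + (j - 1 - i) = j - 1 from by omega,
        show j - 1 - i + 1 = j - i from by omega, List.range'_one] at h
      exact h.symm
    rw [hsplit2, List.filter_append, List.map_append]
    congr 1
    · unfold pvCuts
      congr 1
      apply List.filter_congr
      intro m hm
      rw [List.mem_range'_1] at hm
      exact hend_mid m (by omega) (by omega)
    · rw [List.filter_cons_of_pos (p := pvEndF w) hend_last]
      simp [show j - 1 + 1 = j from by omega]
  unfold pvSE
  rw [hS, hE, List.zip_append (by simp), List.map_append, ← pvChain_snoc]

-- ---- the main invariant: A's outer loop computes B's filters-zip from position i on ----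
theorem pvLoopA_eq (w : List Char) (i : Nat)
    (H : pvNuc w ((i : Nat) : Int) = true → pvNuc w (((i : Nat) : Int) - 1) = false)
    (groups : List (Int × Int)) :
    pvLoopA w i groups = groups ++ pvSE w i := by
  rw [pvLoopA]
  by_cases hi : i < w.length
  · rw [dif_pos hi]
    by_cases hv : pvIsV (pvAt w i) = true
    · rw [dif_pos hv]
      by_cases hq : pvAt w i = 'u' ∧ 0 < i ∧ pvAt w (i - 1) = 'q'
      · -- qu-skip: position i is not a nucleus
        rw [if_pos hq]
        have hn : pvNuc w ((i : Nat) : Int) = false := by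
          rw [pvNuc_natCast]
          simp [hq.1, hq.2.1, hq.2.2]
        have H' : pvNuc w (((i + 1 : Nat) : Int)) = true →
            pvNuc w (((i + 1 : Nat) : Int) - 1) = false := by
          intro _
          rw [pvNuc_cast_sub_one w (i + 1) (by omega)]
          simpa using hn
        rw [pvLoopA_eq w (i + 1) H', pvSE_skip w i hi hn]
      · -- a vowel run starts at i
        rw [if_neg hq]
        have hni : pvNuc w ((i : Nat) : Int) = true := by
          rw [pvNuc_natCast]
          simp only [hv, decide_eq_true_eq, Bool.and_eq_true, Bool.not_eq_true',
            Bool.and_eq_false_iff, decide_eq_false_iff_not]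
          refine ⟨by simpa using hi, ?_⟩
          tauto
        show pvLoopA w (pvFindJ w i)
            ((pvSplitK w (pvFindJ w i) i i groups).1 ++
              [(((pvSplitK w (pvFindJ w i) i i groups).2 : Int), ((pvFindJ w i) : Int))]) =
          groups ++ pvSE w i
        set j := pvFindJ w i with hj
        have hij : i < j := pvFindJ_gt w i hi hv
        have hjl : j ≤ w.length := pvFindJ_le w i (Nat.le_of_lt hi)
        have hrun : ∀ k, i ≤ k → k < j → pvIsV (pvAt w k) = true := fun k h1 h2 =>
          pvFindJ_isV w i k h1 (by rw [← hj]; exact h2)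
        have hnk : ∀ k, i ≤ k → k < j → pvNuc w ((k : Nat) : Int) = true := by
          intro k h1 h2
          rcases Nat.eq_or_lt_of_le h1 with rfl | h1'
          · exact hni
          · have hkl : k < w.length := by omega
            have hkv := hrun k h1 h2
            have hkm : pvIsV (pvAt w (k - 1)) = true := hrun (k - 1) (by omega) (by omega)
            have hq' : pvAt w (k - 1) ≠ 'q' := pvIsV_ne_q _ hkm
            rw [pvNuc_natCast]
            simp [hkl, hkv, hq']
        have hnj : pvNuc w ((j : Nat) : Int) = false := by
          rcases Nat.lt_or_ge j w.length with hl | hl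
          · rw [hj] at hl
            have hstop := pvFindJ_stop w i hl
            rw [← hj] at hstop
            rw [pvNuc_natCast]
            simp [hstop]
          · exact pvNuc_oob w _ (by exact_mod_cast hl)
        have hstart_i : pvStartF w i = true := by
          simp [pvStartF, hni, H hni]
        have hstart_mid : ∀ k, i < k → k < j →
            pvStartF w k = pvHiat (pvAt w (k - 1)) (pvAt w k) := by
          intro k h1 h2
          have hk1 : pvNuc w (((k : Nat) : Int) - 1) = true := by
            rw [pvNuc_cast_sub_one w k (by omega)]
            exact hnk (k - 1) (by omega) (by omega)
          simp [pvStartF, hnk k (by omega) h2, hk1]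
        have hend_mid : ∀ k, i ≤ k → k < j - 1 →
            pvEndF w k = pvHiat (pvAt w k) (pvAt w (k + 1)) := by
          intro k h1 h2
          have hk1 : pvNuc w (((k : Nat) : Int) + 1) = true := by
            rw [pvNuc_cast_add_one]
            exact hnk (k + 1) (by omega) (by omega)
          simp [pvEndF, hnk k h1 (by omega), hk1]
        have hend_last : pvEndF w (j - 1) = true := by
          have hk1 : pvNuc w (((j - 1 : Nat) : Int) + 1) = false := by
            rw [pvNuc_cast_add_one, show j - 1 + 1 = j from by omega]
            exact hnj
          simp [pvEndF, hnk (j - 1) (by omega) (by omega), hk1]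
        have H' : pvNuc w ((j : Nat) : Int) = true →
            pvNuc w (((j : Nat) : Int) - 1) = false := by
          intro h
          rw [hnj] at h
          exact absurd h (by simp)
        rw [pvSplitK_eq w j i i groups, pvLoopA_eq w j H',
          pvSE_run w i j hi hij hjl hstart_i hstart_mid hend_mid hend_last]
        simp [List.append_assoc]
    · rw [dif_neg hv]
      have hn : pvNuc w ((i : Nat) : Int) = false := by
        rw [pvNuc_natCast]
        simp [hv]
      have H' : pvNuc w (((i + 1 : Nat) : Int)) = true →
          pvNuc w (((i + 1 : Nat) : Int) - 1) = false := by
        intro _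
        rw [pvNuc_cast_sub_one w (i + 1) (by omega)]
        simpa using hn
      rw [pvLoopA_eq w (i + 1) H', pvSE_skip w i hi hn]
  · rw [dif_neg hi]
    rw [pvSE_oob w i (by omega)]
    simp
termination_by w.length - i
decreasing_by
  · omega
  · omega
  · omega

-- casting the zipped Nat pairs to Int pairs
theorem pvZipMap (S E : List Nat) :
    (S.map (fun (i : Nat) => (i : Int))).zip (E.map (fun (i : Nat) => ((i + 1 : Nat) : Int)))
      = (S.zip (E.map (· + 1))).map pvCC := by
  induction S generalizing E with
  | nil => simp
  | cons a S ih =>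
    cases E with
    | nil => simp
    | cons b E =>
      simp only [List.map_cons, List.zip_cons_cons]
      rw [ih]
      rfl

-- ---- B's pre-trim zip is pvSE at 0 ----
theorem pvAlt_groups (w : List Char) :
    (((List.range w.length).filter (fun i =>
        pvNuc w ((i : Nat) : Int) &&
          (!pvNuc w (((i : Nat) : Int) - 1) || pvHiat (pvAt w (i - 1)) (pvAt w i)))).map
        (fun (i : Nat) => (i : Int))).zip
      (((List.range w.length).filter (fun i =>
        pvNuc w ((i : Nat) : Int) &&
          (!pvNuc w (((i : Nat) : Int) + 1) || pvHiat (pvAt w i) (pvAt w (i + 1))))).map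
        (fun (i : Nat) => ((i + 1 : Nat) : Int))) = pvSE w 0 := by
  have hs : (fun i => pvNuc w ((i : Nat) : Int) &&
      (!pvNuc w (((i : Nat) : Int) - 1) || pvHiat (pvAt w (i - 1)) (pvAt w i))) = pvStartF w := rfl
  have he : (fun i => pvNuc w ((i : Nat) : Int) &&
      (!pvNuc w (((i : Nat) : Int) + 1) || pvHiat (pvAt w i) (pvAt w (i + 1)))) = pvEndF w := rfl
  rw [hs, he, List.range_eq_range']
  exact pvZipMap _ _

-- ===== VERDICT (by name: the statement is the Claim_ definition above) =====
theorem vowel_groups_py_spec : Claim_equal_vowel_groups_py := by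
  unfold Claim_equal_vowel_groups_py
  intro word _
  simp only [Spec_vowel_groups_py, vowel_groups_py, vowel_groups_py_alt]
  have h0 : pvNuc ((PySem.Str.lower word).toList) ((0 : Nat) : Int) = true →
      pvNuc ((PySem.Str.lower word).toList) (((0 : Nat) : Int) - 1) = false :=
    fun _ => pvNuc_of_neg _ _ (by omega)
  rw [pvLoopA_eq _ 0 h0, pvAlt_groups, List.nil_append]
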